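-- pv_equiv track=rewrite | github.com/PedroMTQ/mantis | source/MANTIS_Processor.py | group_output_chunks
-- ===== SOURCE A (Python) =====
-- def group_output_chunks(domtblout_path, all_domtblout_with_chunks, chunk_suffix):
--     # grouping the domtblout into the corresponding original 'hmm'
--     res = {}
--     for domtblout in all_domtblout_with_chunks:
--         if 'chunk' in domtblout:
--             hmm_name = domtblout.split('_chunk_')[0]
--             hmm_domtblout = hmm_name + chunk_suffix
--             if hmm_domtblout not in res: res[hmm_domtblout] = []
--             res[hmm_domtblout].append(domtblout_path + domtblout)
--     return res
-- ===== SOURCE B (Python) =====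
-- def group_output_chunks(domtblout_path, all_domtblout_with_chunks, chunk_suffix):
--     # two-pass: collect keys in first-occurrence order, then gather each group by filtering
--     matching = [d for d in all_domtblout_with_chunks if 'chunk' in d]
--     keys = []
--     for d in matching:
--         k = d.split('_chunk_')[0] + chunk_suffix
--         if k not in keys:
--             keys.append(k)
--     return {k: [domtblout_path + d for d in matching
--                 if d.split('_chunk_')[0] + chunk_suffix == k]
--             for k in keys}
-- ===== Notes on version B (the rewrite author's own statement) =====
-- stated objective: alternative
-- what changed: Replaced A's incremental dict insert-or-append loop by a two-pass scheme: filter the matching entries once, collect the distinct group keys in first-occurrence order, then build each group's list by a per-key filter over the matching entries.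
import Mathlib
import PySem

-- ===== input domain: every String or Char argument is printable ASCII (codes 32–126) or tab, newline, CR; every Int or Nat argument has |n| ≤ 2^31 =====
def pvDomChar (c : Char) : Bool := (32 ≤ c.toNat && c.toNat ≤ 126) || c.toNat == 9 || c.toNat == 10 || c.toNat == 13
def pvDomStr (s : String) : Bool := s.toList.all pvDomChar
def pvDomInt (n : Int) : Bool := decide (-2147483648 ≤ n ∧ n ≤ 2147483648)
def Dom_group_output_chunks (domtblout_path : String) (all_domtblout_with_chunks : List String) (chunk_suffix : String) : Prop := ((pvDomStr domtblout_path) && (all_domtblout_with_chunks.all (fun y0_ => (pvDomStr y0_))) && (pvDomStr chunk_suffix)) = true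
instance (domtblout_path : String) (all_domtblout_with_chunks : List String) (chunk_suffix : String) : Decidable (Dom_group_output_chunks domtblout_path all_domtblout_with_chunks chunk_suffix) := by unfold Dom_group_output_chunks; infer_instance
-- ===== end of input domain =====

-- B replaces A's incremental dict insert-or-append loop by a two-pass filter/group scheme (objective: alternative, same result).

-- ===== PORT A =====
def group_output_chunks (domtblout_path : String) (all_domtblout_with_chunks : List String) (chunk_suffix : String) : List (String × List String) :=
  (all_domtblout_with_chunks.foldl
    (fun (res : PySem.Dict String (List String)) domtblout =>
      if PySem.Str.isIn "chunk" domtblout then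
        -- split with a non-empty separator never returns [], so [0] is headD
        let hmm_name := ((PySem.Str.split? domtblout "_chunk_").getD []).headD ""
        let hmm_domtblout := hmm_name ++ chunk_suffix
        let res1 := if res.contains hmm_domtblout then res else res.insert hmm_domtblout []
        res1.modify hmm_domtblout [] (fun l => l ++ [domtblout_path ++ domtblout])
      else res)
    PySem.Dict.empty).items

-- ===== PORT B =====
def group_output_chunks_alt (domtblout_path : String) (all_domtblout_with_chunks : List String) (chunk_suffix : String) : List (String × List String) :=
  let matching := all_domtblout_with_chunks.filter (fun d => PySem.Str.isIn "chunk" d)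
  let key := fun (d : String) => ((PySem.Str.split? d "_chunk_").getD []).headD "" ++ chunk_suffix
  let keys := matching.foldl (fun ks d => if ks.contains (key d) then ks else ks ++ [key d]) []
  keys.map (fun k => (k, (matching.filter (fun d => key d == k)).map (fun d => domtblout_path ++ d)))

-- ===== PRECONDITION & SPEC =====
def Spec_group_output_chunks (domtblout_path : String) (all_domtblout_with_chunks : List String) (chunk_suffix : String) (out : List (String × List String)) : Prop := out = group_output_chunks_alt domtblout_path all_domtblout_with_chunks chunk_suffix
instance (domtblout_path : String) (all_domtblout_with_chunks : List String) (chunk_suffix : String) (out : List (String × List String)) : Decidable (Spec_group_output_chunks domtblout_path all_domtblout_with_chunks chunk_suffix out) := by unfold Spec_group_output_chunks; infer_instance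

-- ===== CLAIM (what is proved, stated in full; the proofs are below) =====
def Claim_equal_group_output_chunks : Prop := ∀ (domtblout_path : String) (all_domtblout_with_chunks : List String) (chunk_suffix : String), Dom_group_output_chunks domtblout_path all_domtblout_with_chunks chunk_suffix → Spec_group_output_chunks domtblout_path all_domtblout_with_chunks chunk_suffix (group_output_chunks domtblout_path all_domtblout_with_chunks chunk_suffix)

-- ===== LEMMAS AND PROOFS =====

-- a loop that skips non-matching elements is a loop over the filtered list
theorem pv_foldl_if_filter {α β : Type} (c : β → Bool) (g : α → β → α) :
    ∀ (l : List β) (init : α),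
      l.foldl (fun acc x => if c x then g acc x else acc) init = (l.filter c).foldl g init := by
  intro l
  induction l with
  | nil => intro init; rfl
  | cons h t ih =>
      intro init
      by_cases hc : c h = true <;> simp [List.filter, hc, ih]

-- A's setdefault-then-append step is a single modify
theorem pv_step_eq (res : PySem.Dict String (List String)) (k : String) (w : List String) :
    ((if res.contains k then res else res.insert k []).modify k [] (fun l => l ++ w))
      = res.modify k [] (fun l => l ++ w) := by
  by_cases h : res.contains k = true
  · simp [h]
  · simp only [h, Bool.false_eq_true, if_false]
    show ((res.insert k []).insert k (((res.insert k []).getD k []) ++ w))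
        = res.insert k ((res.getD k []) ++ w)
    rw [PySem.Dict.getD_insert_self, PySem.Dict.insert_insert_self,
        PySem.Dict.getD_of_not_contains _ _ (by simpa using h)]

theorem group_output_chunks_spec : Claim_equal_group_output_chunks := by
  intro domtblout_path all chunk_suffix _hd
  unfold Spec_group_output_chunks group_output_chunks group_output_chunks_alt
  simp only []
  set f : String → String :=
    fun d => ((PySem.Str.split? d "_chunk_").getD []).headD "" ++ chunk_suffix with hf
  set v : String → String := fun d => domtblout_path ++ d with hv
  set L : List String := all.filter (fun d => PySem.Str.isIn "chunk" d) with hL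
  -- Step 1: A's loop = modify-loop over the filtered list
  have h1 : (all.foldl
      (fun (res : PySem.Dict String (List String)) domtblout =>
        if PySem.Str.isIn "chunk" domtblout then
          ((if res.contains (f domtblout) then res else res.insert (f domtblout) []).modify
            (f domtblout) [] (fun l => l ++ [v domtblout]))
        else res) PySem.Dict.empty)
      = L.foldl (fun res d => res.modify (f d) [] (fun l => l ++ [v d])) PySem.Dict.empty := by
    rw [pv_foldl_if_filter, ← hL]
    exact PySem.List.foldl_congr_mem L _ _ _ (fun res d _ => pv_step_eq res (f d) [v d])
  -- Step 2: the modify-loop as a loop over (key, value) pairs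
  have h2 : L.foldl (fun res d => res.modify (f d) [] (fun l => l ++ [v d])) PySem.Dict.empty
      = (L.map (fun d => (f d, v d))).foldl
          (fun res p => res.modify p.1 [] (fun l => l ++ [p.2])) PySem.Dict.empty := by
    rw [List.foldl_map]
  -- the final dict has Nodup keys
  have hnd : (L.foldl (fun res d => res.modify (f d) [] (fun l => l ++ [v d]))
      PySem.Dict.empty).keys.Nodup := by
    exact PySem.Dict.nodup_keys_foldl_modify_key L f [] (fun _ d => fun l => l ++ [v d]) _
      (by simp [PySem.Dict.keys_empty])
  -- its keys, in order
  have hkeys : (L.foldl (fun res d => res.modify (f d) [] (fun l => l ++ [v d]))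
      PySem.Dict.empty).keys = PySem.Set.ofList (L.map f) := by
    have := PySem.Dict.keys_foldl_modify_key L f [] (fun _ d => fun l => l ++ [v d])
      PySem.Dict.empty
    simpa [PySem.Dict.keys_empty] using this
  -- its per-key contents
  have hgetD : ∀ k, (L.foldl (fun res d => res.modify (f d) [] (fun l => l ++ [v d]))
      PySem.Dict.empty).getD k []
      = (L.filter (fun d => f d == k)).map v := by
    intro k
    rw [h2, PySem.Dict.getD_foldl_modify_append]
    simp [List.filter_map, Function.comp_def]
  -- B's key-collecting loop builds the same ordered set of keys
  have hbk : (L.foldl (fun ks d => if ks.contains (f d) then ks else ks ++ [f d]) [])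
      = PySem.Set.ofList (L.map f) := by
    rw [PySem.Set.ofList_eq_foldl, List.foldl_map]
    exact PySem.List.foldl_congr_mem L _ _ _ (fun ks d _ => by simp [PySem.Set.add])
  rw [h1, PySem.Dict.items_eq_map_keys _ hnd [], hkeys, ← hbk]
  apply List.map_congr_left
  intro k _
  rw [hgetD k]
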